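-- pv_equiv track=rewrite | github.com/SavageCowsea/Analysis-and-design-of-algorithms | tomoSalto.py | yielder
-- ===== SOURCE A (Python) =====
-- from itertools import product
--
-- def yielder(arr):
--     ans = -1
--     gen = (product({'t', 's'}, repeat=len(arr)))
--     while(True):
--         ans1 = 0
--         try:
--             play1 = next(gen)
--             last = ''
--             for x, y in enumerate(play1):
--                 if x != 0:
--
--                     if y == 't':
--                         ans1 += arr[x]
--                         if last == 't':
--                             ans1 = ans1-arr[x-1]
--                     last = y
--                 else:
--                     if y == 't':
--                         ans1 += arr[x]
--                     last = y
--             if(ans1 > ans):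
--
--                 ans = ans1
--         except:
--             break
--     yield ans
-- ===== SOURCE B (Python) =====
-- def yielder(arr):
--     # Linear DP over positions: t = best score with last jump 't', s = best with last 's'.
--     if not arr:
--         yield 0
--         return
--     t, s, prev = arr[0], 0, arr[0]
--     for v in arr[1:]:
--         t, s, prev = max(s + v, t + v - prev), max(t, s), v
--     yield max(t, s)
-- ===== Notes on version B (the rewrite author's own statement) =====
-- stated objective: faster
-- what changed: A enumerates all 2^n 't'/'s' sequences and scores each one; B is a single linear pass keeping the best score ending in 't' and in 's' (DP over the last choice).
import Mathlib
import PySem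

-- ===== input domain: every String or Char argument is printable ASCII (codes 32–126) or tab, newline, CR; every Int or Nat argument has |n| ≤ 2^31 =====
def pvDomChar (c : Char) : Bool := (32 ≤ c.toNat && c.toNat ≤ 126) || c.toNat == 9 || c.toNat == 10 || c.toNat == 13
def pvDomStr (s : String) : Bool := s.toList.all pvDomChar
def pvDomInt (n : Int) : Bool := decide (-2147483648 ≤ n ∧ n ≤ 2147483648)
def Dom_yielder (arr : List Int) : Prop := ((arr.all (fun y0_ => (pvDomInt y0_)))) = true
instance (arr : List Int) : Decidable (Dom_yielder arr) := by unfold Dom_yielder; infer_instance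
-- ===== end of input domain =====

-- B replaces A's exhaustive scoring of all 2^n 't'/'s' sequences by one linear pass tracking
-- the best score ending in 't' and in 's' (a timing run measured this asymptotically faster).
-- A is a generator yielding exactly one value; both ports return that singleton list.

-- ===== PORT A =====
-- product({'t','s'}, repeat=n), first factor varying slowest; the set's iteration order does
-- not affect the result (a maximum over ALL sequences).
def pvAllPlays : Nat → List (List String)
  | 0 => [[]]
  | n + 1 => ((pvAllPlays n).map (fun p => "t" :: p)) ++ ((pvAllPlays n).map (fun p => "s" :: p))

-- the body of A's 'for x, y in enumerate(play1)' loop; arr[x] / arr[x-1] are always in range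
-- (x indexes a play of length len(arr)), so pyGetD is exact here.
def pvStepA (arr : List Int) (st : Int × String) (xy : Int × String) : Int × String :=
  let (ans1, last) := st
  let (x, y) := xy
  if x ≠ 0 then
    let ans1 := if y = "t" then
        (let a := ans1 + PySem.List.pyGetD arr x 0
         if last = "t" then a - PySem.List.pyGetD arr (x - 1) 0 else a)
      else ans1
    (ans1, y)
  else
    ((if y = "t" then ans1 + PySem.List.pyGetD arr x 0 else ans1), y)

def yielder (arr : List Int) : List Int :=
  let plays := pvAllPlays arr.length
  let ans := plays.foldl (fun ans play1 =>
      let st := (PySem.List.enumerate play1 0).foldl (pvStepA arr) (0, "")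
      if st.1 > ans then st.1 else ans) (-1)
  [ans]

-- ===== PORT B =====
def yielder_alt (arr : List Int) : List Int :=
  match arr with
  | [] => [0]
  | a :: rest =>
    let st := rest.foldl (fun (st : Int × Int × Int) v =>
        (max (st.2.1 + v) (st.1 + v - st.2.2), max st.1 st.2.1, v)) (a, 0, a)
    [max st.1 st.2.1]

-- ===== PRECONDITION & SPEC =====
def Spec_yielder (arr : List Int) (out : List Int) : Prop := out = yielder_alt arr
instance (arr : List Int) (out : List Int) : Decidable (Spec_yielder arr out) := by unfold Spec_yielder; infer_instance

-- ===== CLAIM (what is proved, stated in full; the proofs are below) =====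
def Claim_equal_yielder : Prop := ∀ (arr : List Int), Dom_yielder arr → Spec_yielder arr (yielder arr)

-- ===== LEMMAS AND PROOFS =====

-- Parallel structural reformulation of A's scoring loop: state (ans1, last, prev value).
def pvSc : (Int × String × Int) → List Int → List String → (Int × String × Int)
  | st, [], _ => st
  | st, _, [] => st
  | (a, l, prev), v :: vs, y :: ys =>
      pvSc ((if y = "t" then a + v - (if l = "t" then prev else 0) else a), y, v) vs ys

-- Backward DP: best additional score over the remaining values given the last choice.
def pvBest : List Int → Bool → Int → Int
  | [], _, _ => 0
  | v :: vs, l, prev =>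
      max ((v - (if l then prev else 0)) + pvBest vs true v) (pvBest vs false v)

theorem pvBest_false_nonneg (vs : List Int) (prev : Int) : 0 ≤ pvBest vs false prev := by
  induction vs generalizing prev with
  | nil => simp [pvBest]
  | cons v vs ih => simp only [pvBest]; have := ih v; omega

theorem pvAllPlays_length {n : Nat} {p : List String} (hp : p ∈ pvAllPlays n) : p.length = n := by
  induction n generalizing p with
  | zero => simp [pvAllPlays] at hp; simp [hp]
  | succ n ih =>
    simp only [pvAllPlays, List.mem_append, List.mem_map] at hp
    rcases hp with ⟨q, hq, rfl⟩ | ⟨q, hq, rfl⟩ <;> simp [ih hq]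

theorem pvGetD_append_mid (pre : List Int) (v : Int) (vs : List Int) :
    (pre ++ v :: vs).getD pre.length 0 = v := by
  simp [List.getD]

theorem pvGetD_append_last (pre : List Int) (hpre : pre ≠ []) (rest : List Int) :
    (pre ++ rest).getD (pre.length - 1) 0 = pre.getLast hpre := by
  have hlen : pre.length - 1 < pre.length := by
    have := List.length_pos_iff.mpr hpre; omega
  rw [List.getD, List.getElem?_append_left hlen]
  simp [List.getLast_eq_getElem, List.getElem?_eq_getElem hlen]

-- Bridge: A's enumerate-indexed loop over the tail of a play equals the structural score.
theorem pvEnumFold (ys : List String) : ∀ (pre vs : List Int) (hpre : pre ≠ [])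
    (hlen : ys.length = vs.length) (a : Int) (l : String),
    (PySem.List.enumerate ys (pre.length : Int)).foldl (pvStepA (pre ++ vs)) (a, l)
      = ((pvSc (a, l, pre.getLast hpre) vs ys).1, (pvSc (a, l, pre.getLast hpre) vs ys).2.1) := by
  induction ys with
  | nil =>
    intro pre vs hpre hlen a l
    cases vs with
    | nil => clear hlen; simp [PySem.List.enumerate_nil, pvSc]
    | cons v vs => simp at hlen
  | cons y ys ih =>
    intro pre vs hpre hlen a l
    cases vs with
    | nil => simp at hlen
    | cons v vs =>
      have hlen' : ys.length = vs.length := by simpa using hlen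
      have hposn : 0 < pre.length := List.length_pos_iff.mpr hpre
      rw [PySem.List.enumerate_cons]
      have hx : pvStepA (pre ++ v :: vs) (a, l) ((pre.length : Int), y)
          = ((if y = "t" then a + v - (if l = "t" then pre.getLast hpre else 0) else a), y) := by
        have hne : ((pre.length : Int)) ≠ 0 := by exact_mod_cast hposn.ne'
        have hcast : ((pre.length : Int)) - 1 = ((pre.length - 1 : Nat) : Int) := by
          push_cast [Nat.cast_sub (by omega : 1 ≤ pre.length)]; ring
        simp only [pvStepA, if_pos hne, hcast, PySem.List.pyGetD_natCast,
          pvGetD_append_mid, pvGetD_append_last pre hpre]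
        by_cases hy : y = "t" <;> by_cases hl : l = "t" <;> simp [hy, hl]
      rw [List.foldl_cons, hx]
      have hre : pre ++ v :: vs = (pre ++ [v]) ++ vs := by simp
      have hlast : (pre ++ [v]).getLast (by simp) = v := by simp
      have hlenp : ((pre.length : Int)) + 1 = (((pre ++ [v]).length : Nat) : Int) := by
        simp
      rw [hre, hlenp, ih (pre ++ [v]) vs (by simp) hlen' _ y]
      simp only [hlast, pvSc]

-- Exhaustive max over all completions equals the backward DP.
theorem pvBrute (vs : List Int) : ∀ (st : Int × String × Int) (acc : Int),
    (pvAllPlays vs.length).foldl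
        (fun ans p => if (pvSc st vs p).1 > ans then (pvSc st vs p).1 else ans) acc
      = max acc (st.1 + pvBest vs (st.2.1 == "t") st.2.2) := by
  induction vs with
  | nil =>
    intro st acc
    simp only [List.length_nil, pvAllPlays, List.foldl_cons, List.foldl_nil, pvSc, pvBest]
    split <;> omega
  | cons v vs ih =>
    intro st acc
    obtain ⟨a, l, prev⟩ := st
    show (pvAllPlays (vs.length + 1)).foldl _ acc = _
    rw [show pvAllPlays (vs.length + 1)
        = ((pvAllPlays vs.length).map (fun p => "t" :: p))
          ++ ((pvAllPlays vs.length).map (fun p => "s" :: p)) from rfl]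
    rw [List.foldl_append, List.foldl_map, List.foldl_map]
    simp only [pvSc]
    rw [ih, ih]
    simp only [pvBest]
    by_cases hl : l = "t" <;> simp [hl] <;> omega

-- B's forward DP equals the same backward DP.
theorem pvForward (vs : List Int) : ∀ (t s prev : Int),
    (max (vs.foldl (fun (st : Int × Int × Int) v =>
        (max (st.2.1 + v) (st.1 + v - st.2.2), max st.1 st.2.1, v)) (t, s, prev)).1
      (vs.foldl (fun (st : Int × Int × Int) v =>
        (max (st.2.1 + v) (st.1 + v - st.2.2), max st.1 st.2.1, v)) (t, s, prev)).2.1)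
      = max (t + pvBest vs true prev) (s + pvBest vs false prev) := by
  induction vs with
  | nil => intro t s prev; simp [pvBest]
  | cons v vs ih =>
    intro t s prev
    rw [List.foldl_cons]
    rw [show ((max ((t, s, prev).2.1 + v) ((t, s, prev).1 + v - (t, s, prev).2.2),
        max (t, s, prev).1 (t, s, prev).2.1, v) : Int × Int × Int)
      = (max (s + v) (t + v - prev), max t s, v) from rfl]
    rw [ih]
    simp only [pvBest, Bool.false_eq_true, if_false, if_true]
    omega

theorem pvFoldMax_congr (l : List (List String)) (f g : List String → Int) (acc : Int)
    (h : ∀ p ∈ l, f p = g p) :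
    l.foldl (fun ans p => if f p > ans then f p else ans) acc
      = l.foldl (fun ans p => if g p > ans then g p else ans) acc := by
  induction l generalizing acc with
  | nil => rfl
  | cons p l ih =>
    rw [List.foldl_cons, List.foldl_cons, h p (by simp)]
    exact ih _ (fun q hq => h q (List.mem_cons_of_mem _ hq))

theorem pvFoldMax_eval (vs : List Int) (f : List String → Int) (acc : Int) (st : Int × String × Int)
    (h : ∀ p ∈ pvAllPlays vs.length, f p = (pvSc st vs p).1) :
    (pvAllPlays vs.length).foldl (fun ans p => if f p > ans then f p else ans) acc
      = max acc (st.1 + pvBest vs (st.2.1 == "t") st.2.2) := by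
  rw [pvFoldMax_congr _ f (fun p => (pvSc st vs p).1) acc h]
  exact pvBrute vs st acc

-- ===== VERDICT (by name: the statement is the Claim_ definition above) =====
theorem yielder_spec : Claim_equal_yielder := by
  intro arr _
  unfold Spec_yielder
  cases arr with
  | nil => decide
  | cons a vs =>
    unfold yielder yielder_alt
    simp only []
    rw [show (a :: vs).length = vs.length + 1 from rfl,
      show pvAllPlays (vs.length + 1)
        = ((pvAllPlays vs.length).map (fun p => "t" :: p))
          ++ ((pvAllPlays vs.length).map (fun p => "s" :: p)) from rfl]
    rw [List.foldl_append, List.foldl_map, List.foldl_map]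
    have hfirst : ∀ (y : String) p, (PySem.List.enumerate (y :: p) 0).foldl (pvStepA (a :: vs)) (0, "")
        = (PySem.List.enumerate p 1).foldl (pvStepA (a :: vs))
            ((if y = "t" then a else 0), y) := by
      intro y p
      rw [PySem.List.enumerate_cons, List.foldl_cons]
      congr 1
      simp only [pvStepA]
      by_cases hy : y = "t" <;> simp [hy, PySem.List.pyGetD_zero_cons]
    have hbridge : ∀ (y : String), ∀ p ∈ pvAllPlays vs.length,
        ((PySem.List.enumerate (y :: p) 0).foldl (pvStepA (a :: vs)) (0, "")).1
          = (pvSc ((if y = "t" then a else 0), y, a) vs p).1 := by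
      intro y p hp
      rw [hfirst y p]
      have h := pvEnumFold p [a] vs (by simp) (by simpa using pvAllPlays_length hp)
        (if y = "t" then a else 0) y
      have h1 : (([a].length : Nat) : Int) = 1 := by simp
      have h2 : ([a].getLast (by simp) : Int) = a := rfl
      rw [h1, h2, List.singleton_append] at h
      rw [h]
    have E1 : (pvAllPlays vs.length).foldl
        (fun ans p => if ((PySem.List.enumerate ("t" :: p) 0).foldl (pvStepA (a :: vs)) (0, "")).1 > ans
          then ((PySem.List.enumerate ("t" :: p) 0).foldl (pvStepA (a :: vs)) (0, "")).1 else ans)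
        (-1)
        = max (-1) (a + pvBest vs true a) :=
      pvFoldMax_eval vs _ (-1) (a, "t", a) (fun p hp => by rw [hbridge "t" p hp]; simp)
    have E2 : (pvAllPlays vs.length).foldl
        (fun ans p => if ((PySem.List.enumerate ("s" :: p) 0).foldl (pvStepA (a :: vs)) (0, "")).1 > ans
          then ((PySem.List.enumerate ("s" :: p) 0).foldl (pvStepA (a :: vs)) (0, "")).1 else ans)
        (max (-1) (a + pvBest vs true a))
        = max (max (-1) (a + pvBest vs true a)) (0 + pvBest vs false a) :=
      pvFoldMax_eval vs _ (max (-1) (a + pvBest vs true a)) (0, "s", a)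
        (fun p hp => by rw [hbridge "s" p hp]; simp)
    rw [E1, E2]
    have hB := pvForward vs a 0 a
    have hnn := pvBest_false_nonneg vs a
    congr 1
    omega
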